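-- pv_equiv track=rewrite | github.com/MichelCF/crm | src/logic/user_logic.py | get_segment_for_products
-- ===== SOURCE A (Python) =====
-- from typing import List
--
-- ESTETICA_PRODUCT_IDS = {
--     "5587176",
--     "5554091",
--     "5587203",
--     "5560445",
--     "5588268",
--     "5716749",
--     "6289449",
--     "6289465",
-- }
--
-- def get_segment_for_products(product_ids: List[str]) -> str:
--     """
--     Categorizes a list of product IDs into a segment.
--     - If all are in ESTETICA_PRODUCT_IDS -> 'ESTETICA'
--     - If none are in ESTETICA_PRODUCT_IDS -> 'ILPI'
--     - If there's a mix -> 'AMBOS'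
--     """
--     if not product_ids:
--         return None
--
--     has_estetica = any(pid in ESTETICA_PRODUCT_IDS for pid in product_ids)
--     has_ilpi = any(pid not in ESTETICA_PRODUCT_IDS for pid in product_ids)
--
--     if has_estetica and has_ilpi:
--         return "AMBOS"
--     if has_estetica:
--         return "ESTETICA"
--     return "ILPI"
-- ===== SOURCE B (Python) =====
-- ESTETICA_PRODUCT_IDS = {
--     "5587176",
--     "5554091",
--     "5587203",
--     "5560445",
--     "5588268",
--     "5716749",
--     "6289449",
--     "6289465",
-- }
--
-- def get_segment_for_products(product_ids):
--     if not product_ids: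
--         return None
--     first = product_ids[0] in ESTETICA_PRODUCT_IDS
--     for pid in product_ids[1:]:
--         if (pid in ESTETICA_PRODUCT_IDS) != first:
--             return "AMBOS"
--     return "ESTETICA" if first else "ILPI"
-- ===== Notes on version B (the rewrite author's own statement) =====
-- stated objective: alternative
-- what changed: Replaces A's two full any() membership scans and boolean-combination branching by a single early-exit pass: remember the first id's membership and return 'AMBOS' the moment any later id's membership disagrees, else decide by the first id's membership.
import Mathlib
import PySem

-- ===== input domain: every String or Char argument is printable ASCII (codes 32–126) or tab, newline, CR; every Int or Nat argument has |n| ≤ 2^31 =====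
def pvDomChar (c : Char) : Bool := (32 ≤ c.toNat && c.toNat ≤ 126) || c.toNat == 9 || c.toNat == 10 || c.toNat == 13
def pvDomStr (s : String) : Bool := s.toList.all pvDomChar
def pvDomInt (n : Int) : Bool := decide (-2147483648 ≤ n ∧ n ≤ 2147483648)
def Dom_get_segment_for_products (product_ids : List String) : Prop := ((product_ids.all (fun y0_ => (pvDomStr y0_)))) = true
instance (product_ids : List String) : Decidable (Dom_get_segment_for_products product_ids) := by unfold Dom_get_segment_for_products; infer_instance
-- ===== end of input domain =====

-- B replaces A's two full any() scans by a single early-exit pass comparing each id's membership with the first id's; objective: alternative.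

-- ===== PORT A =====
def ESTETICA_PRODUCT_IDS : PySem.Set String :=
  PySem.Set.ofList ["5587176","5554091","5587203","5560445","5588268","5716749","6289449","6289465"]

def get_segment_for_products (product_ids : List String) : Option String :=
  if product_ids = [] then none
  else
    let has_estetica := product_ids.any (fun pid => PySem.Set.contains ESTETICA_PRODUCT_IDS pid)
    let has_ilpi := product_ids.any (fun pid => !PySem.Set.contains ESTETICA_PRODUCT_IDS pid)
    if has_estetica && has_ilpi then some "AMBOS"
    else if has_estetica then some "ESTETICA"
    else some "ILPI"

-- ===== PORT B =====
-- the for-loop of Source B: scan the tail, early return "AMBOS" on a membership mismatch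
def pvLoopB (first : Bool) : List String → String
  | [] => if first then "ESTETICA" else "ILPI"
  | pid :: rest =>
    if (PySem.Set.contains ESTETICA_PRODUCT_IDS pid) != first then "AMBOS"
    else pvLoopB first rest

def get_segment_for_products_alt (product_ids : List String) : Option String :=
  match product_ids with
  | [] => none
  | x :: xs => some (pvLoopB (PySem.Set.contains ESTETICA_PRODUCT_IDS x) xs)

-- ===== PRECONDITION & SPEC =====
def Spec_get_segment_for_products (product_ids : List String) (out : Option String) : Prop := out = get_segment_for_products_alt product_ids
instance (product_ids : List String) (out : Option String) : Decidable (Spec_get_segment_for_products product_ids out) := by unfold Spec_get_segment_for_products; infer_instance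

-- ===== CLAIM (what is proved, stated in full; the proofs are below) =====
def Claim_equal_get_segment_for_products : Prop := ∀ (product_ids : List String), Dom_get_segment_for_products product_ids → Spec_get_segment_for_products product_ids (get_segment_for_products product_ids)

-- ===== LEMMAS AND PROOFS =====

lemma pvLoopB_eq (first : Bool) (xs : List String) :
    pvLoopB first xs =
      if xs.any (fun p => PySem.Set.contains ESTETICA_PRODUCT_IDS p != first) then "AMBOS"
      else if first then "ESTETICA" else "ILPI" := by
  induction xs with
  | nil => simp [pvLoopB]
  | cons p rest ih =>
    by_cases hp : p ∈ ESTETICA_PRODUCT_IDS <;> cases first <;>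
      simp [pvLoopB, hp, ih]

-- ===== VERDICT (by name: the statement is the Claim_ definition above) =====
theorem get_segment_for_products_spec : Claim_equal_get_segment_for_products := by
  intro l _
  unfold Spec_get_segment_for_products get_segment_for_products get_segment_for_products_alt
  rcases l with _ | ⟨x, xs⟩
  · rfl
  · simp only [if_neg (by simp : ¬(x :: xs = [])), pvLoopB_eq]
    cases hx : PySem.Set.contains ESTETICA_PRODUCT_IDS x <;>
      by_cases hE : (xs.any fun p => PySem.Set.contains ESTETICA_PRODUCT_IDS p) = true <;>
        by_cases hI : (xs.any fun p => !PySem.Set.contains ESTETICA_PRODUCT_IDS p) = true <;>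
          (simp_all [List.any_eq_true]; try (split_ifs <;> rfl))
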